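-- pv_equiv track=rewrite | github.com/dan1306/dan1306-codecrafters-shell-python | app/main.py | split_with_spaces
-- ===== SOURCE A (Python) =====
-- def split_with_spaces(input_string):
--     result = []
--     word = ''
--     for char in input_string:
--         if char == ' ':
--             if word:
--                 result.append(word)
--                 word = ''
--             result.append(' ')
--         else:
--             word += char
--     if word:
--         result.append(word)
--     return result
-- ===== SOURCE B (Python) =====
-- import re
--
-- def split_with_spaces(input_string):
--     return re.findall(r'[^ ]+| ', input_string)
-- ===== Notes on version B (the rewrite author's own statement) =====
-- stated objective: idiomatic
-- what changed: Replaces the manual accumulator loop with a single regex findall r'[^ ]+| ' that tokenizes maximal non-space runs and individual spaces.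
import Mathlib
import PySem

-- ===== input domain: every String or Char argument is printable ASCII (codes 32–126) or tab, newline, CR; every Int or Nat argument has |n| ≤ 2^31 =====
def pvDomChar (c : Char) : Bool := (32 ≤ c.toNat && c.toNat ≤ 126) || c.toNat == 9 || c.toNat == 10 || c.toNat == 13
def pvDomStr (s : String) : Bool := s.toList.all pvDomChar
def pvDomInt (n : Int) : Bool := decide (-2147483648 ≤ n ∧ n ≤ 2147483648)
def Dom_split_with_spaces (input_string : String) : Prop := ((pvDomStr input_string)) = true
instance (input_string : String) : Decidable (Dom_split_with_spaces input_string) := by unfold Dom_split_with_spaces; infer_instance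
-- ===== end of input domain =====

-- B replaces A's manual accumulator loop with regex-style tokenization (re.findall r'[^ ]+| '): idiomatic, same cost.

-- ===== PORT A =====
-- A's loop: state = (result list, current word); word is kept as List Char, appended char by char.
def pvLoopA (res : List String) (word : List Char) : List Char → List String
  | [] => if word.isEmpty then res else res ++ [String.mk word]
  | c :: cs =>
    if c = ' ' then
      pvLoopA ((if word.isEmpty then res else res ++ [String.mk word]) ++ [" "]) [] cs
    else
      pvLoopA res (word ++ [c]) cs

def split_with_spaces (input_string : String) : List String :=
  pvLoopA [] [] input_string.toList

-- ===== PORT B =====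
-- Port of re.findall(r'[^ ]+| '): at each position, a space matches as " ";
-- otherwise the first alternative greedily takes the maximal run of non-space characters.
def pvTok : List Char → List String
  | [] => []
  | c :: cs =>
    if c = ' ' then " " :: pvTok cs
    else String.mk ((c :: cs).takeWhile (· ≠ ' ')) :: pvTok ((c :: cs).dropWhile (· ≠ ' '))
termination_by l => l.length
decreasing_by
  · simp
  · rename_i h
    simp [h]
    exact List.length_dropWhile_le _ _

def split_with_spaces_alt (input_string : String) : List String :=
  pvTok input_string.toList

-- ===== PRECONDITION & SPEC =====
def Spec_split_with_spaces (input_string : String) (out : List String) : Prop := out = split_with_spaces_alt input_string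
instance (input_string : String) (out : List String) : Decidable (Spec_split_with_spaces input_string out) := by unfold Spec_split_with_spaces; infer_instance

-- ===== CLAIM (what is proved, stated in full; the proofs are below) =====
def Claim_equal_split_with_spaces : Prop := ∀ (input_string : String), Dom_split_with_spaces input_string → Spec_split_with_spaces input_string (split_with_spaces input_string)

-- ===== LEMMAS AND PROOFS =====
lemma pv_takeWhile_pre (word l : List Char) (hw : ∀ c ∈ word, c ≠ ' ') :
    (word ++ l).takeWhile (· ≠ ' ') = word ++ l.takeWhile (· ≠ ' ') := by
  induction word with
  | nil => simp
  | cons w ws ih =>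
    have : w ≠ ' ' := hw w (by simp)
    simp only [List.cons_append, List.takeWhile_cons, decide_eq_true_eq, if_pos this]
    rw [ih (fun c hc => hw c (by simp [hc]))]

lemma pv_dropWhile_pre (word l : List Char) (hw : ∀ c ∈ word, c ≠ ' ') :
    (word ++ l).dropWhile (· ≠ ' ') = l.dropWhile (· ≠ ' ') := by
  induction word with
  | nil => simp
  | cons w ws ih =>
    have : w ≠ ' ' := hw w (by simp)
    simp only [List.cons_append, List.dropWhile_cons, decide_eq_true_eq, if_pos this]
    exact ih (fun c hc => hw c (by simp [hc]))

-- one regex step on a nonempty space-free prefix: the first alternative takes the maximal run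
lemma pvTok_prepend (w : Char) (ws l : List Char) (hw : ∀ c ∈ w :: ws, c ≠ ' ') :
    pvTok ((w :: ws) ++ l) =
      String.mk ((w :: ws) ++ l.takeWhile (· ≠ ' ')) :: pvTok (l.dropWhile (· ≠ ' ')) := by
  have hw' : w ≠ ' ' := hw w (by simp)
  rw [pvTok.eq_def]
  simp only [List.cons_append, if_neg hw']
  rw [show (w :: (ws ++ l)) = (w :: ws) ++ l from by simp,
      pv_takeWhile_pre _ _ hw, pv_dropWhile_pre _ _ hw]
  simp

-- Loop invariant: with a space-free pending word, A's loop produces res ++ tokenization of word ++ rest.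
lemma pvLoopA_eq_tok (l : List Char) : ∀ (res : List String) (word : List Char),
    (∀ c ∈ word, c ≠ ' ') → pvLoopA res word l = res ++ pvTok (word ++ l) := by
  induction l with
  | nil =>
    intro res word hw
    cases word with
    | nil => simp [pvLoopA, pvTok]
    | cons w ws =>
      rw [pvTok_prepend w ws [] hw]
      simp [pvLoopA, pvTok]
  | cons c cs ih =>
    intro res word hw
    by_cases hc : c = ' '
    · subst hc
      rw [pvLoopA, if_pos rfl, ih _ [] (by simp)]
      cases word with
      | nil => simp [pvTok]
      | cons w ws =>
        rw [pvTok_prepend w ws (' ' :: cs) hw]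
        simp [pvTok]
    · rw [pvLoopA, if_neg hc,
          ih res (word ++ [c]) (by
            intro x hx
            rcases List.mem_append.mp hx with h | h
            · exact hw x h
            · simp at h; subst h; exact hc)]
      simp

-- ===== VERDICT (by name: the statement is the Claim_ definition above) =====
theorem split_with_spaces_spec : Claim_equal_split_with_spaces := by
  intro s _
  unfold Spec_split_with_spaces split_with_spaces split_with_spaces_alt
  simpa using pvLoopA_eq_tok s.toList [] [] (by simp)
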